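-- pv_equiv track=rewrite | github.com/LucasVaz97/Aps2MecanicaDosSolidos | mec.py | makeLoads
-- ===== SOURCE A (Python) =====
-- def makeLoads(loads, u_template):
--
--     F = []
--
--     for i in range(len(u_template)):
--         hasAppended1 = False
--         hasAppended2 = False
--
--         for j in range(len(loads)):
--             if(u_template[i][0] == 1):
--
--                 if((loads[j][0] == i+1) and (loads[j][1] == 1)):
--
--                     if(not hasAppended1):
--                         F.append(loads[j][2])
--                         hasAppended1 = True
--
--             if(u_template[i][1] == 1):
--
--                 if((loads[j][0] == i+1) and (loads[j][1] == 2)):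
--
--                     if(not hasAppended2):
--                         F.append(loads[j][2])
--                         hasAppended2 = True
--
--         if(not hasAppended1 and u_template[i][0] == 1):
--             F.append(0)
--
--         if(not hasAppended2 and u_template[i][1] == 1):
--             F.append(0)
--
--     return F
-- ===== SOURCE B (Python) =====
-- def makeLoads(loads, u_template):
--     first = {}
--     for L in loads:
--         key = (L[0], L[1])
--         val = L[2]
--         first.setdefault(key, val)
--     F = []
--     for i, row in enumerate(u_template):
--         node = i + 1
--         if row[0] == 1:
--             F.append(first.get((node, 1), 0))
--         if row[1] == 1:
--             F.append(first.get((node, 2), 0))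
--     return F
-- ===== Notes on version B (the rewrite author's own statement) =====
-- stated objective: faster
-- what changed: Replaces the per-row nested scan of loads by a dict built in one pass mapping (node,direction) to its first value, then a single pass over u_template emitting the dir-1 slot then the dir-2 slot with O(1) lookups; Pre_ excludes ragged rows (u_template row shorter than 2 or loads row shorter than 3), where A raises IndexError or returns only because its lazy scan skips the missing cell and B raises.
-- intended difference: On rows whose both DOFs are free, A appends the node's two load values in loads-scan order (and a lone dir-2 value before the dir-1 zero), so a dir-2 load occurring first lands in the dir-1 slot; B always emits the dir-1 slot then the dir-2 slot, the intended DOF alignment of the force vector. — e.g. on makeLoads([[1, 2, 7], [1, 1, 5]], [[1, 1]]): A returns [7, 5], B returns [5, 7]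
-- outside the precondition, e.g. on makeLoads([[1, 1]], [[0, 0]]): A returns [], B raises IndexError
import Mathlib
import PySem

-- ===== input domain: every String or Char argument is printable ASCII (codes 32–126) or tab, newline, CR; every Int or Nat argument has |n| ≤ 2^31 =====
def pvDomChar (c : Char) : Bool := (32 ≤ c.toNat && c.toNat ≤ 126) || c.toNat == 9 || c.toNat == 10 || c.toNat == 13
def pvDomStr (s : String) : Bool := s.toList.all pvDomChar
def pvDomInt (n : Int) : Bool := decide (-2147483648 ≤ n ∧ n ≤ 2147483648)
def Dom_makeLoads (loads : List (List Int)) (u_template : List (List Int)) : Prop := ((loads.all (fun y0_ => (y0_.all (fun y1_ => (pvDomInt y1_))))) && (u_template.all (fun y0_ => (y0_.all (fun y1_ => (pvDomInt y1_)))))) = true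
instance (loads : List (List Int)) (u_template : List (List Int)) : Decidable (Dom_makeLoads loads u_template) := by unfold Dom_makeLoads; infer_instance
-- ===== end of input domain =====

-- B builds a (node,direction) -> first-value dict in one pass over loads, then emits per
-- template row the dir-1 slot then the dir-2 slot (asymptotically faster, O(N+M) vs O(N*M)).
-- Where A emits the two values of a doubly-free node in scan order instead of DOF order,
-- that is stated as an intended difference (D_ below).

-- ===== PORT A =====
-- the body of A's inner "for j in range(len(loads))" loop (state: F, hasAppended1, hasAppended2)
def makeLoadsStep (u_template : List (List Int)) (i : Nat) (s : List Int × Bool × Bool) (L : List Int) : List Int × Bool × Bool :=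
  let s :=
    if (u_template.getD i []).getD 0 0 = 1 ∧ L.getD 0 0 = (i : Int) + 1 ∧ L.getD 1 0 = 1 ∧ s.2.1 = false
    then (s.1 ++ [L.getD 2 0], true, s.2.2) else s
  if (u_template.getD i []).getD 1 0 = 1 ∧ L.getD 0 0 = (i : Int) + 1 ∧ L.getD 1 0 = 2 ∧ s.2.2 = false
  then (s.1 ++ [L.getD 2 0], s.2.1, true) else s

def makeLoads (loads : List (List Int)) (u_template : List (List Int)) : List Int :=
  (List.range u_template.length).foldl (fun F i =>
    let s := loads.foldl (makeLoadsStep u_template i) (F, false, false)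
    let F := if s.2.1 = false ∧ (u_template.getD i []).getD 0 0 = 1 then s.1 ++ [0] else s.1
    if s.2.2 = false ∧ (u_template.getD i []).getD 1 0 = 1 then F ++ [0] else F) []

-- ===== PORT B =====
def makeLoads_alt (loads : List (List Int)) (u_template : List (List Int)) : List Int :=
  let first : PySem.Dict (Int × Int) Int :=
    loads.foldl (fun d L =>
      let key := (L.getD 0 0, L.getD 1 0)
      let val := L.getD 2 0
      d.setdefault key val) PySem.Dict.empty
  (PySem.List.enumerate u_template 0).foldl (fun F iRow =>
    let i := iRow.1
    let row := iRow.2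
    let node := i + 1
    let F := if row.getD 0 0 = 1 then F ++ [first.getD (node, 1) 0] else F
    if row.getD 1 0 = 1 then F ++ [first.getD (node, 2) 0] else F) []

-- ===== PRECONDITION & SPEC =====
-- Pre_ excludes ragged inputs (a u_template row shorter than 2, or a loads row shorter than 3):
-- there A raises IndexError or returns only because its lazy scan happens not to touch the
-- missing cell, and B (which indexes every loads row once) raises.
def Pre_makeLoads (loads : List (List Int)) (u_template : List (List Int)) : Prop :=
  (∀ r ∈ u_template, 2 ≤ r.length) ∧ (∀ L ∈ loads, 3 ≤ L.length)
instance (loads : List (List Int)) (u_template : List (List Int)) : Decidable (Pre_makeLoads loads u_template) := by unfold Pre_makeLoads; infer_instance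
def pvWitness_makeLoads : List (List Int) × List (List Int) := ([[1, 1, 5], [1, 2, 7]], [[1, 1], [0, 1]])

-- On template rows whose both DOFs are free, A appends the node's two load values in loads-scan
-- order (and a lone dir-2 value BEFORE the dir-1 zero), so a dir-2 load occurring first lands in
-- the dir-1 slot; B always emits the dir-1 slot then the dir-2 slot, which is the intended DOF
-- alignment of the force vector.
def D_makeLoads (loads : List (List Int)) (u_template : List (List Int)) : Prop :=
  ∃ i < u_template.length,
    let j d := loads.findIdx fun L => L.take 2 == [(i : Int) + 1, d]
    let w k := (loads.getD k []).getD 2 0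
    [1, 1] <+: u_template.getD i [] ∧ w (j 1 ⊓ j 2) ≠ w (j 1)
instance (loads : List (List Int)) (u_template : List (List Int)) : Decidable (D_makeLoads loads u_template) := by unfold D_makeLoads; infer_instance

def Spec_makeLoads (loads : List (List Int)) (u_template : List (List Int)) (out : List Int) : Prop := ¬ D_makeLoads loads u_template → out = makeLoads_alt loads u_template
instance (loads : List (List Int)) (u_template : List (List Int)) (out : List Int) : Decidable (Spec_makeLoads loads u_template out) := by unfold Spec_makeLoads; infer_instance

def pvDiffWitness_makeLoads : List (List Int) × List (List Int) := ([[1, 2, 7], [1, 1, 5]], [[1, 1]])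
def pvDiffWitnessOut_makeLoads : (List Int) × (List Int) := ([7, 5], [5, 7])

-- ===== CLAIM (what is proved, stated in full; the proofs are below) =====
def Claim_unchanged_makeLoads : Prop := ∀ (loads : List (List Int)) (u_template : List (List Int)), Dom_makeLoads loads u_template → Pre_makeLoads loads u_template → Spec_makeLoads loads u_template (makeLoads loads u_template)
def Claim_changed_makeLoads : Prop := Dom_makeLoads (pvDiffWitness_makeLoads.1) (pvDiffWitness_makeLoads.2) ∧ Pre_makeLoads (pvDiffWitness_makeLoads.1) (pvDiffWitness_makeLoads.2) ∧ D_makeLoads (pvDiffWitness_makeLoads.1) (pvDiffWitness_makeLoads.2) ∧ makeLoads (pvDiffWitness_makeLoads.1) (pvDiffWitness_makeLoads.2) = pvDiffWitnessOut_makeLoads.1 ∧ makeLoads_alt (pvDiffWitness_makeLoads.1) (pvDiffWitness_makeLoads.2) = pvDiffWitnessOut_makeLoads.2 ∧ pvDiffWitnessOut_makeLoads.1 ≠ pvDiffWitnessOut_makeLoads.2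
def Claim_exact_makeLoads : Prop := ∀ (loads : List (List Int)) (u_template : List (List Int)), Dom_makeLoads loads u_template → Pre_makeLoads loads u_template → D_makeLoads loads u_template → makeLoads loads u_template ≠ makeLoads_alt loads u_template

-- ===== LEMMAS AND PROOFS =====

-- proof-side helpers: first load matching a (node, direction) query, with its scan position
def pvQ1 (i : Int) (L : List Int) : Bool := (L.getD 0 0 == i + 1) && (L.getD 1 0 == 1)
def pvQ2 (i : Int) (L : List Int) : Bool := (L.getD 0 0 == i + 1) && (L.getD 1 0 == 2)
def pvFindE (p : List Int → Bool) (k : Int) (loads : List (List Int)) : Option (Int × List Int) :=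
  (PySem.List.enumerate loads k).find? (fun jL => p jL.2)

def pvRowBug (loads : List (List Int)) (i : Int) (row : List Int) : Bool :=
  row.getD 0 0 == 1 && row.getD 1 0 == 1 &&
  match pvFindE (pvQ1 i) 0 loads, pvFindE (pvQ2 i) 0 loads with
  | some a, some b => decide (b.1 < a.1) && (b.2.getD 2 0 != a.2.getD 2 0)
  | none, some b => b.2.getD 2 0 != 0
  | _, _ => false

-- pvFindE in terms of findIdx (bridges D_ to the proof helpers)
lemma pvFindE_findIdx (p : List Int → Bool) :
    ∀ (loads : List (List Int)) (k : Int),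
    pvFindE p k loads =
      if loads.findIdx p < loads.length
      then some (k + (loads.findIdx p : Int), loads.getD (loads.findIdx p) []) else none := by
  intro loads
  induction loads with
  | nil => intro k; simp [pvFindE, PySem.List.enumerate_nil]
  | cons L ls ih =>
    intro k
    have hfind : pvFindE p k (L :: ls) =
        if p L then some (k, L) else pvFindE p (k + 1) ls := by
      simp [pvFindE, PySem.List.enumerate_cons, List.find?_cons]
      split <;> simp_all
    rw [hfind, List.findIdx_cons]
    cases hp : p L with
    | true => simp
    | false =>
      rw [ih (k + 1)]
      by_cases hlt : ls.findIdx p < ls.length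
      · simp only [cond_false, List.length_cons, if_pos hlt,
          if_pos (by omega : ls.findIdx p + 1 < ls.length + 1)]
        simp [List.getD_cons_succ]
        omega
      · simp only [cond_false, List.length_cons]
        rw [if_neg hlt, if_neg (by omega : ¬ ls.findIdx p + 1 < ls.length + 1)]
        simp

-- D_ restated through pvRowBug
lemma pvBug_iff (loads : List (List Int)) (i : Nat) (row : List Int) :
    pvRowBug loads (i : Int) row = true ↔
      (row.getD 0 0 = 1 ∧ row.getD 1 0 = 1 ∧
       loads.findIdx (pvQ2 (i : Int)) < loads.findIdx (pvQ1 (i : Int)) ∧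
       loads.findIdx (pvQ2 (i : Int)) < loads.length ∧
       (loads.getD (loads.findIdx (pvQ2 (i : Int))) []).getD 2 0 ≠
         (loads.getD (loads.findIdx (pvQ1 (i : Int))) []).getD 2 0) := by
  unfold pvRowBug
  rw [pvFindE_findIdx (pvQ1 (i : Int)) loads 0, pvFindE_findIdx (pvQ2 (i : Int)) loads 0]
  have hle1 := List.findIdx_le_length (p := pvQ1 (i : Int)) (xs := loads)
  have hle2 := List.findIdx_le_length (p := pvQ2 (i : Int)) (xs := loads)
  by_cases h1 : loads.findIdx (pvQ1 (i : Int)) < loads.length <;>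
    by_cases h2 : loads.findIdx (pvQ2 (i : Int)) < loads.length
  · rw [if_pos h1, if_pos h2]
    simp only [Bool.and_eq_true, beq_iff_eq, decide_eq_true_eq, bne_iff_ne, ne_eq]
    constructor
    · rintro ⟨⟨ha, hb⟩, hlt, hne⟩; exact ⟨ha, hb, by omega, h2, hne⟩
    · rintro ⟨ha, hb, hlt, -, hne⟩; exact ⟨⟨ha, hb⟩, by omega, hne⟩
  · rw [if_pos h1, if_neg h2]
    have hj2 : loads.findIdx (pvQ2 (i : Int)) = loads.length := by omega
    simp only [Bool.and_false]
    constructor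
    · intro h; cases h
    · rintro ⟨-, -, hlt, -, -⟩; omega
  · rw [if_neg h1, if_pos h2]
    have hj1 : loads.findIdx (pvQ1 (i : Int)) = loads.length := by omega
    have hnil : loads.getD (loads.findIdx (pvQ1 (i : Int))) [] = [] :=
      List.getD_eq_default _ _ (by omega)
    simp only [Bool.and_eq_true, beq_iff_eq, bne_iff_ne, ne_eq]
    constructor
    · rintro ⟨⟨ha, hb⟩, hne⟩
      exact ⟨ha, hb, by omega, h2, by rw [hnil]; simpa using hne⟩
    · rintro ⟨ha, hb, -, -, hne⟩
      rw [hnil] at hne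
      exact ⟨⟨ha, hb⟩, by simpa using hne⟩
  · rw [if_neg h1, if_neg h2]
    have hj2 : loads.findIdx (pvQ2 (i : Int)) = loads.length := by omega
    simp only [Bool.and_false]
    constructor
    · intro h; cases h
    · rintro ⟨-, -, hlt, -, -⟩; omega

lemma pvTakeQ1 (i : Nat) :
    (fun (L : List Int) => L.take 2 == [(i : Int) + 1, 1]) = pvQ1 (i : Int) := by
  funext L
  match L with
  | [] => simp [pvQ1]
  | [x] => simp [pvQ1]
  | x :: y :: tl => simp [pvQ1, List.take]

lemma pvTakeQ2 (i : Nat) :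
    (fun (L : List Int) => L.take 2 == [(i : Int) + 1, 2]) = pvQ2 (i : Int) := by
  funext L
  match L with
  | [] => simp [pvQ2]
  | [x] => simp [pvQ2]
  | x :: y :: tl => simp [pvQ2, List.take]

lemma pvPrefix_iff (row : List Int) :
    [1, 1] <+: row ↔ (row.getD 0 0 = 1 ∧ row.getD 1 0 = 1) := by
  match row with
  | [] => simp
  | [x] => simp [List.cons_prefix_cons]
  | x :: y :: tl => simp [List.cons_prefix_cons, eq_comm]

lemma pvD_iff (loads u : List (List Int)) :
    D_makeLoads loads u ↔ ∃ i < u.length, pvRowBug loads (i : Int) (u.getD i []) = true := by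
  unfold D_makeLoads
  constructor <;> intro ⟨i, hi, h⟩ <;> refine ⟨i, hi, ?_⟩
  · obtain ⟨hpre, hw⟩ := h
    simp only [pvTakeQ1 i, pvTakeQ2 i] at hw
    obtain ⟨ha, hb⟩ := (pvPrefix_iff _).mp hpre
    rcases le_or_gt (loads.findIdx (pvQ1 (i : Int))) (loads.findIdx (pvQ2 (i : Int))) with hle | hlt
    · rw [min_eq_left hle] at hw
      exact absurd rfl hw
    · refine (pvBug_iff loads i (u.getD i [])).mpr
        ⟨ha, hb, hlt, by have := List.findIdx_le_length (p := pvQ1 (i : Int)) (xs := loads); omega, ?_⟩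
      simpa [min_eq_right (le_of_lt hlt)] using hw
  · obtain ⟨ha, hb, hlt, -, hne⟩ := (pvBug_iff loads i (u.getD i [])).mp h
    refine ⟨(pvPrefix_iff _).mpr ⟨ha, hb⟩, ?_⟩
    simp only [pvTakeQ1 i, pvTakeQ2 i]
    simpa [min_eq_right (le_of_lt hlt)] using hne

def pvMerge : Option (Int × List Int) → Option (Int × List Int) → List Int
  | some a, some b => if a.1 < b.1 then [a.2.getD 2 0, b.2.getD 2 0] else [b.2.getD 2 0, a.2.getD 2 0]
  | some a, none => [a.2.getD 2 0]
  | none, some b => [b.2.getD 2 0]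
  | none, none => []

-- A's per-row emitted segment
def pvRowOut (loads : List (List Int)) (i : Int) (row : List Int) : List Int :=
  let o1 := if row.getD 0 0 = 1 then pvFindE (pvQ1 i) 0 loads else none
  let o2 := if row.getD 1 0 = 1 then pvFindE (pvQ2 i) 0 loads else none
  pvMerge o1 o2
    ++ (if row.getD 0 0 = 1 ∧ o1 = none then [0] else [])
    ++ (if row.getD 1 0 = 1 ∧ o2 = none then [0] else [])

-- B's per-row emitted segment
def pvRowB (loads : List (List Int)) (i : Int) (row : List Int) : List Int :=
  (if row.getD 0 0 = 1 then [((pvFindE (pvQ1 i) 0 loads).map (fun jL => jL.2.getD 2 0)).getD 0] else [])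
    ++ (if row.getD 1 0 = 1 then [((pvFindE (pvQ2 i) 0 loads).map (fun jL => jL.2.getD 2 0)).getD 0] else [])

-- A-side intermediate: the per-row emission loop with the two "hasAppended" flags
def pvRowEmit (p1 p2 : List Int → Bool) (h1 h2 : Bool) : List (List Int) → List Int × Bool × Bool
  | [] => ([], h1, h2)
  | L :: ls =>
    let e1 := !h1 && p1 L
    let e2 := !h2 && p2 L
    let r := pvRowEmit p1 p2 (h1 || e1) (h2 || e2) ls
    ((if e1 then [L.getD 2 0] else []) ++ (if e2 then [L.getD 2 0] else []) ++ r.1, r.2)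

lemma pvFindE_index_lt {p : List Int → Bool} {k j : Int} {L : List Int} {loads : List (List Int)}
    (h : pvFindE p k loads = some (j, L)) : k ≤ j := by
  have hm := List.mem_of_find?_eq_some h
  rw [PySem.List.mem_enumerate_iff] at hm
  obtain ⟨k', hk', he⟩ := hm
  have : j = k + (k' : Int) := congrArg Prod.fst he
  omega

lemma pvRowEmit_char (p1 p2 : List Int → Bool) :
    ∀ (loads : List (List Int)) (k : Int) (h1 h2 : Bool),
    pvRowEmit p1 p2 h1 h2 loads =
      (pvMerge (if h1 then none else pvFindE p1 k loads) (if h2 then none else pvFindE p2 k loads),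
       h1 || (pvFindE p1 k loads).isSome, h2 || (pvFindE p2 k loads).isSome) := by
  intro loads
  induction loads with
  | nil =>
    intro k h1 h2
    cases h1 <;> cases h2 <;> simp [pvRowEmit, pvFindE, PySem.List.enumerate_nil, pvMerge]
  | cons L ls ih =>
    intro k h1 h2
    have hfind1 : pvFindE p1 k (L :: ls) =
        if p1 L then some (k, L) else pvFindE p1 (k + 1) ls := by
      simp [pvFindE, PySem.List.enumerate_cons, List.find?_cons]
      split <;> simp_all
    have hfind2 : pvFindE p2 k (L :: ls) =
        if p2 L then some (k, L) else pvFindE p2 (k + 1) ls := by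
      simp [pvFindE, PySem.List.enumerate_cons, List.find?_cons]
      split <;> simp_all
    rw [pvRowEmit, ih (k + 1), hfind1, hfind2]
    cases hp1 : p1 L <;> cases hp2 : p2 L <;> cases h1 <;> cases h2 <;>
      simp [pvMerge]
    · -- p1 L = false, p2 L = true: the p2 value is emitted first
      cases ho1 : pvFindE p1 (k + 1) ls with
      | none => simp
      | some a =>
        obtain ⟨j, M⟩ := a
        have hk := pvFindE_index_lt ho1
        simp [show ¬ j < k by omega]
    · -- p1 L = true, p2 L = false: the p1 value is emitted first
      cases ho2 : pvFindE p2 (k + 1) ls with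
      | none => simp
      | some b =>
        obtain ⟨j, M⟩ := b
        have hk := pvFindE_index_lt ho2
        simp [show k < j by omega]

set_option maxHeartbeats 1600000 in
lemma pvStepA (u : List (List Int)) (i : Nat) (s : List Int × Bool × Bool) (L : List Int) :
    makeLoadsStep u i s L =
      (s.1 ++ (if !s.2.1 && (decide ((u.getD i []).getD 0 0 = 1) && pvQ1 (i : Int) L) then [L.getD 2 0] else [])
          ++ (if !s.2.2 && (decide ((u.getD i []).getD 1 0 = 1) && pvQ2 (i : Int) L) then [L.getD 2 0] else []),
       s.2.1 || (!s.2.1 && (decide ((u.getD i []).getD 0 0 = 1) && pvQ1 (i : Int) L)),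
       s.2.2 || (!s.2.2 && (decide ((u.getD i []).getD 1 0 = 1) && pvQ2 (i : Int) L))) := by
  obtain ⟨F, h1, h2⟩ := s
  simp only [makeLoadsStep]
  cases h1 <;> cases h2 <;>
    by_cases hf1 : (u.getD i []).getD 0 0 = 1 <;> by_cases hf2 : (u.getD i []).getD 1 0 = 1 <;>
    by_cases hm0 : L.getD 0 0 = (i : Int) + 1 <;> by_cases hm1 : L.getD 1 0 = 1 <;>
    by_cases hm2 : L.getD 1 0 = 2 <;>
    simp_all [pvQ1, pvQ2]

lemma pvInnerA (u : List (List Int)) (i : Nat) (loads : List (List Int)) :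
    ∀ (F : List Int) (h1 h2 : Bool),
    loads.foldl (makeLoadsStep u i) (F, h1, h2) =
    (F ++ (pvRowEmit (fun L => decide ((u.getD i []).getD 0 0 = 1) && pvQ1 (i : Int) L)
                     (fun L => decide ((u.getD i []).getD 1 0 = 1) && pvQ2 (i : Int) L) h1 h2 loads).1,
     (pvRowEmit (fun L => decide ((u.getD i []).getD 0 0 = 1) && pvQ1 (i : Int) L)
                (fun L => decide ((u.getD i []).getD 1 0 = 1) && pvQ2 (i : Int) L) h1 h2 loads).2) := by
  induction loads with
  | nil => intro F h1 h2; simp [pvRowEmit]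
  | cons L ls ih =>
    intro F h1 h2
    rw [List.foldl_cons, pvStepA, pvRowEmit, ih]
    simp

lemma pvFindE_guard (c : Bool) (q : List Int → Bool) (k : Int) (loads : List (List Int)) :
    pvFindE (fun L => c && q L) k loads = if c then pvFindE q k loads else none := by
  cases c <;> simp [pvFindE]

lemma pvBodyA (loads : List (List Int)) (u : List (List Int)) (i : Nat) (F : List Int) :
    (let s := loads.foldl (makeLoadsStep u i) (F, false, false)
     let F' := if s.2.1 = false ∧ (u.getD i []).getD 0 0 = 1 then s.1 ++ [0] else s.1
     if s.2.2 = false ∧ (u.getD i []).getD 1 0 = 1 then F' ++ [0] else F') =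
    F ++ pvRowOut loads (i : Int) (u.getD i []) := by
  simp only [pvInnerA, pvRowEmit_char _ _ loads 0 false false, pvFindE_guard]
  unfold pvRowOut
  by_cases hf1 : (u.getD i []).getD 0 0 = 1 <;> by_cases hf2 : (u.getD i []).getD 1 0 = 1 <;>
    cases ho1 : pvFindE (pvQ1 (i : Int)) 0 loads <;> cases ho2 : pvFindE (pvQ2 (i : Int)) 0 loads <;>
    simp_all [pvMerge]

lemma pvAEq (loads u : List (List Int)) :
    makeLoads loads u =
      (List.range u.length).flatMap (fun i => pvRowOut loads (Int.ofNat i) (u.getD i [])) := by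
  unfold makeLoads
  rw [show (fun (F : List Int) (i : Nat) =>
      let s := loads.foldl (makeLoadsStep u i) (F, false, false)
      let F := if s.2.1 = false ∧ (u.getD i []).getD 0 0 = 1 then s.1 ++ [0] else s.1
      if s.2.2 = false ∧ (u.getD i []).getD 1 0 = 1 then F ++ [0] else F) =
    (fun (F : List Int) (i : Nat) => F ++ pvRowOut loads (Int.ofNat i) (u.getD i [])) from
    funext fun F => funext fun i => pvBodyA loads u i F]
  exact PySem.List.foldl_append_eq_flatMap _ _ _

-- B-side: the dict built by the setdefault loop answers "first matching load's value"
lemma pvDictChar (loads : List (List Int)) (key : Int × Int) :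
    ∀ (d : PySem.Dict (Int × Int) Int),
    (loads.foldl (fun d L => d.setdefault (L.getD 0 0, L.getD 1 0) (L.getD 2 0)) d).get? key =
    (match d.get? key with
     | some v => some v
     | none => (loads.find? (fun L => (((L.getD 0 0, L.getD 1 0) : Int × Int)) == key)).map
                 (fun L => L.getD 2 0)) := by
  induction loads with
  | nil =>
    intro d
    cases h : d.get? key <;> simp [h]
  | cons L ls ih =>
    intro d
    rw [List.foldl_cons, ih, List.find?_cons]
    by_cases hk : ((L.getD 0 0, L.getD 1 0) : Int × Int) = key
    · subst hk
      cases h : d.get? (L.getD 0 0, L.getD 1 0) <;>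
        simp_all [PySem.Dict.get?_setdefault_self]
    · have hb : (((L.getD 0 0, L.getD 1 0) : Int × Int) == key) = false := by
        simpa using hk
      rw [PySem.Dict.get?_setdefault_of_ne d _ (Ne.symm hk), hb]

-- find? on the raw list is the value part of pvFindE
lemma pvFindE_snd (p : List Int → Bool) :
    ∀ (loads : List (List Int)) (k : Int),
    loads.find? p = (pvFindE p k loads).map (·.2) := by
  intro loads
  induction loads with
  | nil => intro k; simp [pvFindE, PySem.List.enumerate_nil]
  | cons L ls ih =>
    intro k
    have hfind : pvFindE p k (L :: ls) =
        if p L then some (k, L) else pvFindE p (k + 1) ls := by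
      simp [pvFindE, PySem.List.enumerate_cons, List.find?_cons]
      split <;> simp_all
    rw [hfind, List.find?_cons]
    cases hp : p L <;> simp [ih (k + 1)]

lemma pvBodyB (loads : List (List Int)) (i : Int) (row : List Int) (F : List Int) :
    (let first : PySem.Dict (Int × Int) Int :=
      loads.foldl (fun d L => d.setdefault (L.getD 0 0, L.getD 1 0) (L.getD 2 0)) PySem.Dict.empty
     let F' := if row.getD 0 0 = 1 then F ++ [first.getD (i + 1, 1) 0] else F
     if row.getD 1 0 = 1 then F' ++ [first.getD (i + 1, 2) 0] else F') =
    F ++ pvRowB loads i row := by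
  have hpq1 : (fun (L : List Int) => (((L.getD 0 0, L.getD 1 0) : Int × Int) == (i + 1, 1))) = pvQ1 i := rfl
  have hpq2 : (fun (L : List Int) => (((L.getD 0 0, L.getD 1 0) : Int × Int) == (i + 1, 2))) = pvQ2 i := rfl
  have hd1 := pvDictChar loads (i + 1, 1) PySem.Dict.empty
  have hd2 := pvDictChar loads (i + 1, 2) PySem.Dict.empty
  rw [PySem.Dict.get?_empty, hpq1, pvFindE_snd (pvQ1 i) loads 0] at hd1
  rw [PySem.Dict.get?_empty, hpq2, pvFindE_snd (pvQ2 i) loads 0] at hd2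
  simp only [PySem.Dict.getD_eq_get?_getD, hd1, hd2, pvRowB]
  by_cases hf1 : row.getD 0 0 = 1 <;> by_cases hf2 : row.getD 1 0 = 1 <;>
    cases ho1 : pvFindE (pvQ1 i) 0 loads <;> cases ho2 : pvFindE (pvQ2 i) 0 loads <;>
    simp_all

lemma pvEnum_eq_map_range (u : List (List Int)) :
    PySem.List.enumerate u 0 = (List.range u.length).map (fun i => ((Int.ofNat i), u.getD i [])) := by
  apply List.ext_getElem?
  intro k
  by_cases hk : k < u.length
  · simp [PySem.List.getElem_enumerate, hk, List.getD_eq_getElem?_getD]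
  · simp [le_of_not_gt hk]

lemma pvBEq (loads u : List (List Int)) :
    makeLoads_alt loads u =
      (List.range u.length).flatMap (fun i => pvRowB loads (Int.ofNat i) (u.getD i [])) := by
  show List.foldl (fun (F : List Int) (iRow : Int × List Int) =>
      let F' := if iRow.2.getD 0 0 = 1 then F ++
        [(loads.foldl (fun d L => d.setdefault (L.getD 0 0, L.getD 1 0) (L.getD 2 0))
          PySem.Dict.empty).getD (iRow.1 + 1, 1) 0] else F
      if iRow.2.getD 1 0 = 1 then F' ++
        [(loads.foldl (fun d L => d.setdefault (L.getD 0 0, L.getD 1 0) (L.getD 2 0))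
          PySem.Dict.empty).getD (iRow.1 + 1, 2) 0] else F') [] (PySem.List.enumerate u 0) = _
  rw [show (fun (F : List Int) (iRow : Int × List Int) =>
      let F' := if iRow.2.getD 0 0 = 1 then F ++
        [(loads.foldl (fun d L => d.setdefault (L.getD 0 0, L.getD 1 0) (L.getD 2 0))
          PySem.Dict.empty).getD (iRow.1 + 1, 1) 0] else F
      if iRow.2.getD 1 0 = 1 then F' ++
        [(loads.foldl (fun d L => d.setdefault (L.getD 0 0, L.getD 1 0) (L.getD 2 0))
          PySem.Dict.empty).getD (iRow.1 + 1, 2) 0] else F') =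
    (fun (F : List Int) (p : Int × List Int) => F ++ pvRowB loads p.1 p.2) from
    funext fun F => funext fun p => pvBodyB loads p.1 p.2 F]
  rw [pvEnum_eq_map_range, List.foldl_map]
  exact PySem.List.foldl_append_eq_flatMap _ _ _

-- on a bug-free row the two segments agree
lemma pvFindE_fst_ne {i : Int} {loads : List (List Int)} {a b : Int × List Int}
    (ho1 : pvFindE (pvQ1 i) 0 loads = some a) (ho2 : pvFindE (pvQ2 i) 0 loads = some b) :
    a.1 ≠ b.1 := by
  intro hfst
  have hma := List.mem_of_find?_eq_some ho1
  have hmb := List.mem_of_find?_eq_some ho2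
  have hpa := List.find?_some ho1
  have hpb := List.find?_some ho2
  rw [PySem.List.mem_enumerate_iff] at hma hmb
  obtain ⟨k, hk, rfl⟩ := hma
  obtain ⟨k', hk', rfl⟩ := hmb
  have : k = k' := by simpa using hfst
  subst this
  simp only [pvQ1, pvQ2, Bool.and_eq_true, beq_iff_eq] at hpa hpb
  omega

lemma pvRow_eq (loads : List (List Int)) (i : Int) (row : List Int)
    (h : pvRowBug loads i row = false) : pvRowOut loads i row = pvRowB loads i row := by
  unfold pvRowBug at h
  unfold pvRowOut pvRowB
  by_cases hf1 : row.getD 0 0 = 1 <;> by_cases hf2 : row.getD 1 0 = 1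
  · -- both DOFs free
    cases ho1 : pvFindE (pvQ1 i) 0 loads with
    | none => cases ho2 : pvFindE (pvQ2 i) 0 loads <;> simp_all [pvMerge]
    | some a =>
      cases ho2 : pvFindE (pvQ2 i) 0 loads with
      | none => simp_all [pvMerge]
      | some b =>
        rw [ho1, ho2] at h
        simp only [hf1, hf2, if_true, ho1, ho2, pvMerge, beq_self_eq_true, Bool.true_and,
          Bool.and_eq_false_iff, decide_eq_true_eq, decide_eq_false_iff_not, not_lt,
          bne_eq_false_iff_eq] at h ⊢
        rcases lt_trichotomy a.1 b.1 with hlt | heq | hgt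
        · simp [hlt]
        · exact absurd heq (pvFindE_fst_ne ho1 ho2)
        · have hvb : b.2[2]?.getD 0 = a.2[2]?.getD 0 := by
            rcases h with h | h
            · omega
            · simpa [List.getD_eq_getElem?_getD] using h
          simp [not_lt.mpr (le_of_lt hgt), hvb]
  · cases ho1 : pvFindE (pvQ1 i) 0 loads <;> simp_all [pvMerge]
  · cases ho2 : pvFindE (pvQ2 i) 0 loads <;> simp_all [pvMerge]
  · simp_all [pvMerge]

-- segment lengths agree on every row
lemma pvRow_len (loads : List (List Int)) (i : Int) (row : List Int) :
    (pvRowOut loads i row).length = (pvRowB loads i row).length := by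
  unfold pvRowOut pvRowB
  by_cases hf1 : row.getD 0 0 = 1 <;> by_cases hf2 : row.getD 1 0 = 1 <;>
    cases ho1 : pvFindE (pvQ1 i) 0 loads <;> cases ho2 : pvFindE (pvQ2 i) 0 loads <;>
    simp_all [pvMerge] <;> split <;> simp

-- flatMaps with pointwise-equal segment lengths agree iff all segments agree
lemma pvFlatMap_eq_segments {α : Type} (f g : α → List Int) :
    ∀ (l : List α), l.flatMap f = l.flatMap g → (∀ x ∈ l, (f x).length = (g x).length) →
    ∀ x ∈ l, f x = g x := by
  intro l
  induction l with
  | nil => intro _ _ x hx; cases hx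
  | cons y ys ih =>
    intro heq hlen x hx
    simp only [List.flatMap_cons] at heq
    obtain ⟨h1, h2⟩ := List.append_inj heq (hlen y (by simp))
    rcases List.mem_cons.mp hx with rfl | hx
    · exact h1
    · exact ih h2 (fun z hz => hlen z (by simp [hz])) x hx

-- on a bug row the two segments differ (their heads differ)
lemma pvRow_ne (loads : List (List Int)) (i : Int) (row : List Int)
    (h : pvRowBug loads i row = true) : pvRowOut loads i row ≠ pvRowB loads i row := by
  unfold pvRowBug at h
  unfold pvRowOut pvRowB
  have hf1 : row.getD 0 0 = 1 := by
    rcases Bool.and_eq_true _ _ |>.mp h with ⟨h', _⟩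
    rcases Bool.and_eq_true _ _ |>.mp h' with ⟨h1, _⟩
    simpa using h1
  have hf2 : row.getD 1 0 = 1 := by
    rcases Bool.and_eq_true _ _ |>.mp h with ⟨h', _⟩
    rcases Bool.and_eq_true _ _ |>.mp h' with ⟨_, h2⟩
    simpa using h2
  cases ho1 : pvFindE (pvQ1 i) 0 loads with
  | none =>
    cases ho2 : pvFindE (pvQ2 i) 0 loads with
    | none => rw [ho1, ho2] at h; simp at h
    | some b =>
      rw [ho1, ho2] at h
      have hvb : b.2.getD 2 0 ≠ 0 := by
        rcases Bool.and_eq_true _ _ |>.mp h with ⟨_, h2⟩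
        simpa using h2
      simp only [hf1, hf2, if_true, ho1, ho2, pvMerge]
      intro heq
      simp at heq
      exact hvb heq.1
  | some a =>
    cases ho2 : pvFindE (pvQ2 i) 0 loads with
    | none => rw [ho1, ho2] at h; simp at h
    | some b =>
      rw [ho1, ho2] at h
      rcases Bool.and_eq_true _ _ |>.mp h with ⟨_, h2⟩
      rcases Bool.and_eq_true _ _ |>.mp h2 with ⟨hlt, hne⟩
      have hlt : b.1 < a.1 := by simpa using hlt
      have hne : b.2.getD 2 0 ≠ a.2.getD 2 0 := by simpa using hne
      simp only [hf1, hf2, if_true, ho1, ho2, pvMerge, not_lt.mpr (le_of_lt hlt),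
        if_neg (not_lt.mpr (le_of_lt hlt))]
      intro heq
      simp at heq
      exact hne heq.1

-- ===== VERDICT (by name: the statements are the Claim_ definitions above) =====
theorem makeLoads_spec : Claim_unchanged_makeLoads := by
  intro loads u _ _ hnd
  show makeLoads loads u = makeLoads_alt loads u
  rw [pvAEq, pvBEq]
  apply List.flatMap_congr
  intro i hi
  apply pvRow_eq
  cases hbug : pvRowBug loads (Int.ofNat i) (u.getD i []) with
  | false => rfl
  | true =>
    exact absurd ((pvD_iff loads u).mpr ⟨i, List.mem_range.mp hi, hbug⟩) hnd

theorem makeLoads_changed : Claim_changed_makeLoads := by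
  unfold Claim_changed_makeLoads; decide

theorem makeLoads_tight : Claim_exact_makeLoads := by
  intro loads u _ _ hd heq
  rw [pvAEq, pvBEq] at heq
  obtain ⟨i, hi, hbug⟩ := (pvD_iff loads u).mp hd
  exact pvRow_ne loads (Int.ofNat i) (u.getD i []) hbug
    (pvFlatMap_eq_segments _ _ _ heq
      (fun x _ => pvRow_len loads (Int.ofNat x) (u.getD x [])) i (List.mem_range.mpr hi))
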